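-- pv_equiv track=rewrite | github.com/JKR8/querytorque_v8 | research/state/generate_prompts_v2.py | parse_dag_sections
-- ===== SOURCE A (Python) =====
-- from typing import List, Dict, Optional, Set
--
-- def parse_dag_sections(dag_prompt: str) -> Dict[str, str]:
--     """Parse the monolithic DAG prompt into named sections.
--
--     Strips premature output instructions (e.g. 'Now output your rewrite_sets:')
--     that leak from DagV2Pipeline's internal prompt structure.
--     """
--     sections = {}
--     current_key = None
--     current_lines = []
--
--     for line in dag_prompt.split('\n'):
--         if line.startswith('## '):
--             # Save previous section
--             if current_key:
--                 sections[current_key] = '\n'.join(current_lines).strip()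
--             current_key = line[3:].strip()
--             current_lines = []
--         elif current_key:
--             # Strip premature output instructions from DAG prompt
--             if line.strip().startswith('Now output'):
--                 continue
--             current_lines.append(line)
--         # Skip lines before first ## (system prompt)
--
--     # Save last section
--     if current_key:
--         sections[current_key] = '\n'.join(current_lines).strip()
--
--     # Extract system prompt (everything before first ##)
--     first_section = dag_prompt.find('## ')
--     if first_section > 0:
--         sections['_system_prompt'] = dag_prompt[:first_section].strip()
--
--     return sections
-- ===== SOURCE B (Python) =====
-- def parse_dag_sections(dag_prompt: str) -> dict:
--     """Two-phase parse: scan ahead to the next section header and slice the body,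
--     instead of threading current_key/current_lines through a state machine."""
--     sections = {}
--     lines = dag_prompt.split('\n')
--     i, n = 0, len(lines)
--     while i < n:
--         line = lines[i]
--         i += 1
--         if line.startswith('## '):
--             key = line[3:].strip()
--             j = i
--             while j < n and not lines[j].startswith('## '):
--                 j += 1
--             if key:
--                 kept = [ln for ln in lines[i:j]
--                         if not ln.strip().startswith('Now output')]
--                 sections[key] = '\n'.join(kept).strip()
--             i = j
--
--     first_section = dag_prompt.find('## ')
--     if first_section > 0:
--         sections['_system_prompt'] = dag_prompt[:first_section].strip()
--     return sections
-- ===== Notes on version B (the rewrite author's own statement) =====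
-- stated objective: alternative
-- what changed: Replaced A's single-pass state machine (current_key/current_lines accumulator threaded through every line) with a two-level scan that, at each section header line, looks ahead to the next header and slices the body lines out directly.
import Mathlib
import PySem

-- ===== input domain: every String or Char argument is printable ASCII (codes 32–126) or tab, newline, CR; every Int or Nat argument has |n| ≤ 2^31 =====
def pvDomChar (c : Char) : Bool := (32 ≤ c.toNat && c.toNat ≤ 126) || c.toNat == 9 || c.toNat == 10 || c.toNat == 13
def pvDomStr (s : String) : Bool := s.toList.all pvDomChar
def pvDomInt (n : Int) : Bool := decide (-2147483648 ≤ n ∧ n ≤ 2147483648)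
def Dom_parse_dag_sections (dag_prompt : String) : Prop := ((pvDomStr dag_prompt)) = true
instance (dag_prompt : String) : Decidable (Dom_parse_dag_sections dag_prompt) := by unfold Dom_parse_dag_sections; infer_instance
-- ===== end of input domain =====

-- B replaces A's current_key/current_lines state machine by a scan-to-next-header
-- slicing pass (objective: alternative decomposition, same cost).


-- shared small helpers (both Pythons contain these identical expressions)
-- '\n'.join(lines).strip()
def pvJoinStrip (lines : List String) : String :=
  PySem.Str.strip (PySem.Str.join "\n" lines)

-- line.strip().startswith('Now output')
def pvIsNowOutput (line : String) : Bool :=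
  PySem.Str.startswith (PySem.Str.strip line) "Now output"

-- ===== PORT A =====
-- Python truthiness of current_key (None or '' are falsy)
def pvTruthy : Option String → Bool
  | some k => k != ""
  | none => false

-- 'if current_key: sections[current_key] = "\n".join(current_lines).strip()'
def pvSaveA (sections : PySem.Dict String String) (currentKey : Option String)
    (currentLines : List String) : PySem.Dict String String :=
  match currentKey with
  | some k => if k != "" then sections.insert k (pvJoinStrip currentLines) else sections
  | none => sections

-- one iteration of A's for-loop over the state (sections, current_key, current_lines)
def pvStepA (st : PySem.Dict String String × Option String × List String)
    (line : String) : PySem.Dict String String × Option String × List String :=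
  let (sections, currentKey, currentLines) := st
  if PySem.Str.startswith line "## " then
    (pvSaveA sections currentKey currentLines,
     some (PySem.Str.strip (PySem.Str.slice line (some 3) none)),
     [])
  else if pvTruthy currentKey then
    if pvIsNowOutput line then (sections, currentKey, currentLines)
    else (sections, currentKey, currentLines ++ [line])
  else (sections, currentKey, currentLines)

def parse_dag_sections (dag_prompt : String) : List (String × String) :=
  let st := ((PySem.Str.split? dag_prompt "\n").getD []).foldl pvStepA (PySem.Dict.empty, none, [])
  let sections := pvSaveA st.1 st.2.1 st.2.2
  let first_section := PySem.Str.find dag_prompt "## "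
  let sections :=
    if first_section > 0 then
      sections.insert "_system_prompt"
        (PySem.Str.strip (PySem.Str.slice dag_prompt none (some first_section)))
    else sections
  sections.items

-- ===== PORT B =====
def pvIsHeader (line : String) : Bool := PySem.Str.startswith line "## "

-- B's outer while loop: at a header, the inner while scan 'j' + the slice lines[i:j]
-- become takeWhile/dropWhile on the remaining lines.
def pvGoB : List String → PySem.Dict String String → PySem.Dict String String
  | [], sections => sections
  | line :: rest, sections =>
    if pvIsHeader line then
      let key := PySem.Str.strip (PySem.Str.slice line (some 3) none)
      let body := rest.takeWhile (fun x => ! pvIsHeader x)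
      let sections' :=
        if key != "" then
          sections.insert key (pvJoinStrip (body.filter (fun ln => ! pvIsNowOutput ln)))
        else sections
      pvGoB (rest.dropWhile (fun x => ! pvIsHeader x)) sections'
    else pvGoB rest sections
termination_by ls _ => ls.length
decreasing_by
  · exact Nat.lt_succ_of_le (rest.length_dropWhile_le _)
  · exact Nat.lt_succ_self _

def parse_dag_sections_alt (dag_prompt : String) : List (String × String) :=
  let sections := pvGoB ((PySem.Str.split? dag_prompt "\n").getD []) PySem.Dict.empty
  let first_section := PySem.Str.find dag_prompt "## "
  let sections :=
    if first_section > 0 then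
      sections.insert "_system_prompt"
        (PySem.Str.strip (PySem.Str.slice dag_prompt none (some first_section)))
    else sections
  sections.items

-- ===== PRECONDITION & SPEC =====
def Spec_parse_dag_sections (dag_prompt : String) (out : List (String × String)) : Prop := out = parse_dag_sections_alt dag_prompt
instance (dag_prompt : String) (out : List (String × String)) : Decidable (Spec_parse_dag_sections dag_prompt out) := by unfold Spec_parse_dag_sections; infer_instance

-- ===== CLAIM (what is proved, stated in full; the proofs are below) =====
def Claim_equal_parse_dag_sections : Prop := ∀ (dag_prompt : String), Dom_parse_dag_sections dag_prompt → Spec_parse_dag_sections dag_prompt (parse_dag_sections dag_prompt)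

-- ===== LEMMAS AND PROOFS =====

-- pvGoB skips non-header lines one at a time, so it may jump over them at once
lemma pvGoB_skip (ls : List String) (d : PySem.Dict String String) :
    pvGoB ls d = pvGoB (ls.dropWhile (fun x => ! pvIsHeader x)) d := by
  induction ls with
  | nil => simp
  | cons l t ih =>
    by_cases h : pvIsHeader l = true
    · simp [h]
    · simp only [Bool.not_eq_true] at h
      rw [pvGoB, List.dropWhile_cons]
      simp [h, ih]

-- the invariant: flushing A's fold state equals B's header-jumping recursion
lemma fold_eq_goB (ls : List String) (d : PySem.Dict String String)
    (okey : Option String) (acc : List String) :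
    (let st := ls.foldl pvStepA (d, okey, acc)
     pvSaveA st.1 st.2.1 st.2.2) =
    (if pvTruthy okey then
       pvGoB (ls.dropWhile (fun x => ! pvIsHeader x))
         (pvSaveA d okey (acc ++ (ls.takeWhile (fun x => ! pvIsHeader x)).filter
            (fun ln => ! pvIsNowOutput ln)))
     else pvGoB ls d) := by
  induction ls generalizing d okey acc with
  | nil =>
    cases okey with
    | none => simp [pvTruthy, pvSaveA, pvGoB]
    | some k =>
      by_cases hk : k = ""
      · simp [hk, pvTruthy, pvSaveA, pvGoB]
      · simp [pvTruthy, hk, pvSaveA, pvGoB]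
  | cons l t ih =>
    by_cases hh : pvIsHeader l = true
    · -- header line
      have hstep : pvStepA (d, okey, acc) l =
          (pvSaveA d okey acc,
           some (PySem.Str.strip (PySem.Str.slice l (some 3) none)), []) := by
        simp [pvStepA, pvIsHeader] at hh ⊢; simp [hh]
      set k' := PySem.Str.strip (PySem.Str.slice l (some 3) none) with hk'
      have hRHSstep : ∀ D : PySem.Dict String String, pvGoB (l :: t) D =
          (if pvTruthy (some k') then
             pvGoB (t.dropWhile (fun x => ! pvIsHeader x))
               (pvSaveA D (some k')
                  ((t.takeWhile (fun x => ! pvIsHeader x)).filter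
                    (fun ln => ! pvIsNowOutput ln)))
           else pvGoB t D) := by
        intro D
        rw [pvGoB]
        simp only [hh, if_true, ← hk']
        by_cases hk : k' = ""
        · simp [hk, pvTruthy, pvGoB_skip t D]
        · simp [pvTruthy, hk, pvSaveA]
      rw [List.foldl_cons, hstep, ih]
      simp only [List.nil_append]
      cases okey with
      | none =>
        simp only [pvTruthy, if_neg Bool.false_ne_true, pvSaveA]
        rw [hRHSstep d]
        simp [pvTruthy, pvSaveA]
      | some k =>
        by_cases hk : k = ""
        · simp only [pvTruthy, hk]
          simp only [bne_self_eq_false, if_neg Bool.false_ne_true]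
          have : pvSaveA d (some "") acc = d := by simp [pvSaveA]
          rw [this, hRHSstep d]
          simp [pvTruthy, pvSaveA]
        · have htr : pvTruthy (some k) = true := by simp [pvTruthy, hk]
          simp only [htr, if_true]
          rw [List.dropWhile_cons, List.takeWhile_cons]
          simp only [hh, Bool.not_true, if_neg Bool.false_ne_true,
            List.filter_nil, List.append_nil]
          rw [hRHSstep (pvSaveA d (some k) acc)]
    · -- non-header line
      simp only [Bool.not_eq_true] at hh
      rw [List.dropWhile_cons, List.takeWhile_cons]
      simp only [hh, Bool.not_false]
      cases okey with
      | none =>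
        have hstep : pvStepA (d, none, acc) l = (d, none, acc) := by
          simp [pvStepA, pvIsHeader] at hh ⊢; simp [hh, pvTruthy]
        rw [List.foldl_cons, hstep, ih]
        simp only [pvTruthy, if_neg Bool.false_ne_true]
        rw [pvGoB]
        simp [hh]
      | some k =>
        by_cases hk : k = ""
        · have hstep : pvStepA (d, some k, acc) l = (d, some k, acc) := by
            simp [pvStepA, pvIsHeader] at hh ⊢; simp [hh, pvTruthy, hk]
          have htr : pvTruthy (some k) = false := by simp [pvTruthy, hk]
          rw [List.foldl_cons, hstep, ih]
          simp only [htr, if_neg Bool.false_ne_true]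
          rw [pvGoB]
          simp [hh]
        · have htr : pvTruthy (some k) = true := by simp [pvTruthy, hk]
          by_cases hn : pvIsNowOutput l = true
          · have hstep : pvStepA (d, some k, acc) l = (d, some k, acc) := by
              simp [pvStepA, pvIsHeader] at hh ⊢; simp [hh, htr, hn]
            rw [List.foldl_cons, hstep, ih]
            simp [htr, hn]
          · simp only [Bool.not_eq_true] at hn
            have hstep : pvStepA (d, some k, acc) l = (d, some k, acc ++ [l]) := by
              simp [pvStepA, pvIsHeader] at hh ⊢; simp [hh, htr, hn]
            rw [List.foldl_cons, hstep, ih]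
            simp [htr, hn]

-- ===== VERDICT (by name: the statement is the Claim_ definition above) =====
theorem parse_dag_sections_spec : Claim_equal_parse_dag_sections := by
  intro dag_prompt _
  unfold Spec_parse_dag_sections parse_dag_sections parse_dag_sections_alt
  have h := fold_eq_goB ((PySem.Str.split? dag_prompt "\n").getD []) PySem.Dict.empty none []
  simp only [pvTruthy, if_neg Bool.false_ne_true] at h
  simp only [h]
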